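-- pv_equiv track=rewrite | github.com/AbanoubM/Algorithmic-Thinking | graphs/make_complete_graph.py | make_complete_graph
-- ===== SOURCE A (Python) =====
-- def make_complete_graph(num_nodes):
--     """ take in param num_nodes, output a complete graph """
--     graph = {}
--     if num_nodes > 0 :
--         for node in range(num_nodes):
--             temp = set([])
--             for itr in range(node):
--                 temp.add(itr)
--             for itr in range(node + 1, num_nodes):
--                 temp.add(itr)
--             graph[node] = temp
--     return graph
-- ===== SOURCE B (Python) =====
-- def make_complete_graph(num_nodes):
--     """ take in param num_nodes, output a complete graph """
--     graph = {}
--     for new in range(num_nodes):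
--         for node in graph:
--             graph[node].add(new)
--         graph[new] = set(range(new))
--     return graph
-- ===== Notes on version B (the rewrite author's own statement) =====
-- stated objective: alternative
-- what changed: B builds the graph incrementally: for each new vertex it appends that vertex to every previously built adjacency set and then installs the new vertex with the earlier vertices as its neighbours, instead of A's per-node from-scratch construction of each full neighbour set by two inner range loops.
import Mathlib
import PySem

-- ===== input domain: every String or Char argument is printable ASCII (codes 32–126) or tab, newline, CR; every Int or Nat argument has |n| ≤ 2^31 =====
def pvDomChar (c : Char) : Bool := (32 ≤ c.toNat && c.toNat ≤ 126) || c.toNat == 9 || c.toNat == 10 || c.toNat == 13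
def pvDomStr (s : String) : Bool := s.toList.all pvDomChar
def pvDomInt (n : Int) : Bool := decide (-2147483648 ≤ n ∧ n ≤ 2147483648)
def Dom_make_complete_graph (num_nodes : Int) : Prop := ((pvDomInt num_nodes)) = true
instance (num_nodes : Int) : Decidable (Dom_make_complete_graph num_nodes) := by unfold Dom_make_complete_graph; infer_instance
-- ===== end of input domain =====

-- B builds the graph incrementally (online): each new vertex is appended to every
-- previously built adjacency set and then installed with the earlier vertices as its
-- neighbours, instead of A's per-node from-scratch construction of each full set.

-- ===== PORT A =====
-- inner body of A's loop: temp = set([]); add 0..node-1; add node+1..num_nodes-1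
def mcg_temp (num_nodes node : Int) : PySem.Set Int :=
  let temp : PySem.Set Int := PySem.Set.ofList ([] : List Int)
  let temp := (PySem.List.pyRange 0 node 1).foldl (fun s itr => PySem.Set.add s itr) temp
  (PySem.List.pyRange (node + 1) num_nodes 1).foldl (fun s itr => PySem.Set.add s itr) temp

def make_complete_graph (num_nodes : Int) : List (Int × List Int) :=
  let graph : PySem.Dict Int (List Int) := PySem.Dict.empty
  let graph :=
    if num_nodes > 0 then
      (PySem.List.pyRange 0 num_nodes 1).foldl
        (fun g node => g.insert node (mcg_temp num_nodes node)) graph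
    else graph
  graph.items

-- ===== PORT B =====
-- body of B's outer loop: for node in graph: graph[node].add(new); graph[new] = set(range(new))
def mcg_step (g : PySem.Dict Int (List Int)) (new : Int) : PySem.Dict Int (List Int) :=
  (g.keys.foldl
    (fun g' node => g'.modify node ([] : List Int) (fun s => PySem.Set.add s new)) g).insert
    new (PySem.Set.ofList (PySem.List.pyRange 0 new 1))

def make_complete_graph_alt (num_nodes : Int) : List (Int × List Int) :=
  ((PySem.List.pyRange 0 num_nodes 1).foldl mcg_step PySem.Dict.empty).items

-- ===== PRECONDITION & SPEC =====
def Spec_make_complete_graph (num_nodes : Int) (out : List (Int × List Int)) : Prop := out = make_complete_graph_alt num_nodes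
instance (num_nodes : Int) (out : List (Int × List Int)) : Decidable (Spec_make_complete_graph num_nodes out) := by unfold Spec_make_complete_graph; infer_instance

-- ===== CLAIM (what is proved, stated in full; the proofs are below) =====
def Claim_equal_make_complete_graph : Prop := ∀ (num_nodes : Int), Dom_make_complete_graph num_nodes → Spec_make_complete_graph num_nodes (make_complete_graph num_nodes)

-- ===== LEMMAS AND PROOFS =====

-- the common shape: node ↦ all other vertices below the bound k, smaller ones first
def mcg_E (k : Int) : List (Int × List Int) :=
  (PySem.List.pyRange 0 k 1).map
    (fun node => (node, PySem.List.pyRange 0 node 1 ++ PySem.List.pyRange (node + 1) k 1))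

theorem mcg_temp_eq (num_nodes node : Int) :
    mcg_temp num_nodes node =
      PySem.List.pyRange 0 node 1 ++ PySem.List.pyRange (node + 1) num_nodes 1 := by
  unfold mcg_temp
  have h1 : (PySem.List.pyRange 0 node 1).foldl
      (fun s itr => PySem.Set.add s itr) (PySem.Set.ofList ([] : List Int)) =
      PySem.List.pyRange 0 node 1 := by
    show PySem.Set.ofList (PySem.List.pyRange 0 node 1) = _
    exact PySem.Set.ofList_eq_self_of_nodup _ (PySem.List.nodup_pyRange_one 0 node)
  simp only [h1]
  have h2 : ∀ (s : PySem.Set Int) (l : List Int),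
      l.foldl (fun s itr => PySem.Set.add s itr) s = PySem.Set.update s l := fun _ _ => rfl
  rw [h2]
  refine PySem.Set.update_eq_append_of_disjoint _ _ (PySem.List.nodup_pyRange_one _ _) ?_
  intro x hx hx'
  rw [PySem.List.mem_pyRange_one] at hx hx'
  omega

-- B's inner loop over the dict's own keys applies f to every stored value in place
theorem foldl_modify_mk (f : List Int → List Int) :
    ∀ (l pre : List (Int × List Int)),
      (((pre ++ l).map (·.1)).Nodup) →
      (l.map (·.1)).foldl
          (fun g' node => g'.modify node ([] : List Int) (fun s => f s))
          (PySem.Dict.mk (pre ++ l)) =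
        PySem.Dict.mk (pre ++ l.map (fun p => (p.1, f p.2))) := by
  intro l
  induction l with
  | nil => intro pre _; simp
  | cons p t ih =>
    intro pre hnd
    have hmem : (p.1, p.2) ∈ (PySem.Dict.mk (pre ++ p :: t)).items := by
      simp
    have hknd : (PySem.Dict.mk (pre ++ p :: t)).keys.Nodup := by
      simpa [PySem.Dict.keys, PySem.Dict.items] using hnd
    have hcont : (PySem.Dict.mk (pre ++ p :: t)).contains p.1 = true := by
      have := PySem.Dict.contains_iff_mem_keys (d := PySem.Dict.mk (pre ++ p :: t)) (k := p.1)
      rw [this]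
      simp [PySem.Dict.keys]
    have hget : (PySem.Dict.mk (pre ++ p :: t)).getD p.1 ([] : List Int) = p.2 :=
      PySem.Dict.getD_of_mem_items _ hmem hknd _
    have hnd2 := hnd
    rw [List.map_append, List.nodup_append] at hnd2
    obtain ⟨-, hndc, hdisj⟩ := hnd2
    rw [List.map_cons, List.nodup_cons] at hndc
    have hne_pre : ∀ q ∈ pre, q.1 ≠ p.1 := by
      intro q hq h
      exact hdisj _ (List.mem_map_of_mem hq) p.1 (by simp) h
    have hne_t : ∀ q ∈ t, q.1 ≠ p.1 := by
      intro q hq h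
      exact hndc.1 (h ▸ List.mem_map_of_mem hq)
    have hstep : (PySem.Dict.mk (pre ++ p :: t)).modify p.1 ([] : List Int) (fun s => f s) =
        PySem.Dict.mk ((pre ++ [(p.1, f p.2)]) ++ t) := by
      unfold PySem.Dict.modify PySem.Dict.insert
      rw [if_pos hcont, hget]
      congr 1
      simp only []
      simp only [List.map_append, List.map_cons, beq_self_eq_true, if_true]
      rw [List.map_congr_left (g := id) (fun q hq => by simp [hne_pre q hq]), List.map_id,
        List.map_congr_left (g := id) (fun q hq => by simp [hne_t q hq]), List.map_id]
      simp
    have hnd' : (((pre ++ [(p.1, f p.2)]) ++ t).map (·.1)).Nodup := by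
      simpa using hnd
    calc ((p :: t).map (·.1)).foldl
          (fun g' node => g'.modify node ([] : List Int) (fun s => f s))
          (PySem.Dict.mk (pre ++ p :: t))
        = (t.map (·.1)).foldl
          (fun g' node => g'.modify node ([] : List Int) (fun s => f s))
          (PySem.Dict.mk ((pre ++ [(p.1, f p.2)]) ++ t)) := by
          simp only [List.map_cons, List.foldl_cons, hstep]
      _ = PySem.Dict.mk ((pre ++ [(p.1, f p.2)]) ++ t.map (fun q => (q.1, f q.2))) :=
          ih (pre ++ [(p.1, f p.2)]) hnd'
      _ = PySem.Dict.mk (pre ++ (p :: t).map (fun q => (q.1, f q.2))) := by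
          simp

theorem mcg_E_keys (k : Int) : ((mcg_E k).map (·.1)) = PySem.List.pyRange 0 k 1 := by
  simp [mcg_E, List.map_map, Function.comp_def]

-- invariant of B's outer loop
theorem mcg_loop (m : Nat) :
    (PySem.List.pyRange 0 (m : Int) 1).foldl mcg_step PySem.Dict.empty =
      PySem.Dict.mk (mcg_E (m : Int)) := by
  induction m with
  | zero =>
    rw [PySem.List.pyRange_one_eq_nil (by norm_num)]
    simp [PySem.Dict.empty, mcg_E, PySem.List.pyRange_one_eq_nil (le_refl (0 : Int))]
  | succ m ih =>
    have hcast : ((m + 1 : Nat) : Int) = (m : Int) + 1 := by push_cast; ring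
    rw [hcast, PySem.List.pyRange_one_succ_right (by positivity), List.foldl_append,
      List.foldl_cons, List.foldl_nil, ih]
    unfold mcg_step
    have hkeys : (PySem.Dict.mk (mcg_E (m : Int))).keys = (mcg_E (m : Int)).map (·.1) := rfl
    have hndk : ((([] : List (Int × List Int)) ++ mcg_E (m : Int)).map (·.1)).Nodup := by
      simp only [List.nil_append, mcg_E_keys]
      exact PySem.List.nodup_pyRange_one 0 (m : Int)
    have hinner := foldl_modify_mk (fun s => PySem.Set.add s (m : Int)) (mcg_E (m : Int)) [] hndk
    simp only [List.nil_append] at hinner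
    rw [hkeys, hinner]
    -- the mapped entries: adding m to (0..node-1)++(node+1..m-1) appends it
    have hmap : (mcg_E (m : Int)).map (fun p => (p.1, PySem.Set.add p.2 (m : Int))) =
        (PySem.List.pyRange 0 (m : Int) 1).map
          (fun node => (node, PySem.List.pyRange 0 node 1 ++
            PySem.List.pyRange (node + 1) ((m : Int) + 1) 1)) := by
      unfold mcg_E
      rw [List.map_map]
      apply List.map_congr_left
      intro node hmem
      rw [PySem.List.mem_pyRange_one] at hmem
      simp only [Function.comp_def]
      have hnotmem : ((m : Int) ∈ PySem.List.pyRange 0 node 1 ++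
          PySem.List.pyRange (node + 1) (m : Int) 1) = False := by
        simp only [List.mem_append, PySem.List.mem_pyRange_one, eq_iff_iff, iff_false]
        omega
      have hadd : PySem.Set.add
          (PySem.List.pyRange 0 node 1 ++ PySem.List.pyRange (node + 1) (m : Int) 1) (m : Int) =
          (PySem.List.pyRange 0 node 1 ++ PySem.List.pyRange (node + 1) (m : Int) 1) ++ [(m:Int)] := by
        unfold PySem.Set.add
        rw [if_neg]
        simp only [PySem.Set.contains, List.contains_eq_mem]
        simp [hnotmem]
      rw [hadd, List.append_assoc,
        ← PySem.List.pyRange_one_succ_right (a := node + 1) (b := (m : Int)) (by omega)]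
    rw [hmap]
    -- appending the fresh vertex m with neighbours 0..m-1
    have hfresh : (PySem.Dict.mk ((PySem.List.pyRange 0 (m : Int) 1).map
        (fun node => (node, PySem.List.pyRange 0 node 1 ++
          PySem.List.pyRange (node + 1) ((m : Int) + 1) 1)))).contains (m : Int) = false := by
      rw [← Bool.not_eq_true]
      rw [PySem.Dict.contains_iff_mem_keys]
      simp only [PySem.Dict.keys, List.map_map, Function.comp_def]
      simp only [List.mem_map, PySem.List.mem_pyRange_one]
      push Not
      intro x hx
      omega
    unfold PySem.Dict.insert
    rw [if_neg (by simp [hfresh])]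
    apply PySem.Dict.ext
    simp only [mcg_E]
    rw [PySem.List.pyRange_one_succ_right (a := 0) (b := (m : Int)) (by positivity),
      List.map_append, List.map_cons]
    congr 1
    · rw [PySem.Set.ofList_eq_self_of_nodup _ (PySem.List.nodup_pyRange_one 0 (m : Int))]
      rw [PySem.List.pyRange_one_eq_nil (a := (m : Int) + 1) (b := (m : Int) + 1) (le_refl _)]
      simp

-- ===== VERDICT (by name: the statement is the Claim_ definition above) =====
theorem make_complete_graph_spec : Claim_equal_make_complete_graph := by
  intro n _
  unfold Spec_make_complete_graph make_complete_graph make_complete_graph_alt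
  by_cases hn : n > 0
  · simp only [hn, if_pos]
    rw [PySem.Dict.items_foldl_insert_fresh _ _ _ _
      (by intro a _; simp [PySem.Dict.contains_empty])
      (by simpa using PySem.List.nodup_pyRange_one 0 n)]
    have hm : n = ((n.toNat : Nat) : Int) := by omega
    rw [hm, mcg_loop n.toNat]
    simp only [PySem.Dict.empty, List.nil_append, mcg_E]
    apply List.map_congr_left
    intro node hmem
    rw [mcg_temp_eq]
  · simp only [hn, if_neg, not_false_iff]
    rw [PySem.List.pyRange_one_eq_nil (by omega)]
    simp [PySem.Dict.empty]
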